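-- pv_equiv track=rewrite | github.com/PK-124960/Compliance_Checking4Intern | scripts/fol_to_shacl_v2.py | detect_target_class
-- ===== SOURCE A (Python) =====
-- ENTITY_MAPPING = {
--     # Student-related
--     "student": "Student",
--     "postgraduate": "PostgraduateStudent",
--     "pg student": "PostgraduateStudent",
--     "master": "PostgraduateStudent",
--     "doctoral": "PostgraduateStudent",
--     "diploma": "PostgraduateStudent",
--     "exchange": "ExchangeStudent",
--     "graduating": "Student",
--
--     # Employee-related
--     "employee": "Employee",
--     "staff": "Staff",
--     "faculty": "Faculty",
--     "instructor": "Faculty",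
--     "invigilator": "Faculty",
--
--     # Financial
--     "fee": "Fee",
--     "tuition": "TuitionFee",
--     "registration": "RegistrationFee",
--     "account": "Account",
--     "overdue": "OverdueAccount",
--     "invoice": "Invoice",
--     "sponsor": "Sponsor",
--     "payment": "Fee",
--
--     # Accommodation
--     "accommodation": "Accommodation",
--     "dormitory": "Dormitory",
--     "housing": "Accommodation",
--     "resident": "Accommodation",
--     "room": "Accommodation",
--
--     # Academic
--     "course": "Course",
--     "research": "Research",
--     "contracted research": "ContractedResearch",
--     "publication": "ResearchPublication",
--     "examination": "Examination",
--     "exam": "Examination",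
--     "semester": "Semester",
--
--     # Process
--     "grievance": "Grievance",
--     "appeal": "Appeal",
--     "committee": "Committee",
--     "grievance committee": "GrievanceCommittee",
--
--     # Default
--     "person": "Person",
-- }
--
-- def detect_target_class(rule_text: str, subject: str = None) -> str:
--     """
--     Detect the appropriate ontology class for a rule based on its text.
--     Returns the most specific matching class.
--     """
--     text_lower = rule_text.lower()
--
--     # Check subject first if provided
--     if subject:
--         subject_lower = subject.lower()
--         for keyword, entity_class in ENTITY_MAPPING.items():
--             if keyword in subject_lower:
--                 return entity_class
--
--     # Priority matching - check longer phrases first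
--     priority_keywords = sorted(ENTITY_MAPPING.keys(), key=len, reverse=True)
--
--     for keyword in priority_keywords:
--         if keyword in text_lower:
--             return ENTITY_MAPPING[keyword]
--
--     # Default to Person if no match
--     return "Person"
-- ===== SOURCE B (Python) =====
-- ENTITY_MAPPING = {
--     "student": "Student", "postgraduate": "PostgraduateStudent",
--     "pg student": "PostgraduateStudent", "master": "PostgraduateStudent",
--     "doctoral": "PostgraduateStudent", "diploma": "PostgraduateStudent",
--     "exchange": "ExchangeStudent", "graduating": "Student",
--     "employee": "Employee", "staff": "Staff", "faculty": "Faculty",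
--     "instructor": "Faculty", "invigilator": "Faculty",
--     "fee": "Fee", "tuition": "TuitionFee", "registration": "RegistrationFee",
--     "account": "Account", "overdue": "OverdueAccount", "invoice": "Invoice",
--     "sponsor": "Sponsor", "payment": "Fee",
--     "accommodation": "Accommodation", "dormitory": "Dormitory",
--     "housing": "Accommodation", "resident": "Accommodation", "room": "Accommodation",
--     "course": "Course", "research": "Research",
--     "contracted research": "ContractedResearch", "publication": "ResearchPublication",
--     "examination": "Examination", "exam": "Examination", "semester": "Semester",
--     "grievance": "Grievance", "appeal": "Appeal", "committee": "Committee",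
--     "grievance committee": "GrievanceCommittee", "person": "Person",
-- }
--
--
-- def detect_target_class(rule_text: str, subject: str = None) -> str:
--     """One fused pass over ENTITY_MAPPING (no sort): track the first keyword
--     matching the subject and the longest keyword matching the text (strict >,
--     so the first-seen wins on equal length), then pick subject match first."""
--     text_lower = rule_text.lower()
--     subject_lower = subject.lower() if subject else None
--
--     subj_cls = None
--     best_len = 0
--     best_cls = "Person"
--     for keyword, entity_class in ENTITY_MAPPING.items():
--         if subj_cls is None and subject_lower is not None and keyword in subject_lower:
--             subj_cls = entity_class
--         if best_len < len(keyword) and keyword in text_lower: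
--             best_len = len(keyword)
--             best_cls = entity_class
--     return subj_cls if subj_cls is not None else best_cls
-- ===== Notes on version B (the rewrite author's own statement) =====
-- stated objective: alternative
-- what changed: Replaces A's two staged early-return loops (subject scan, then sort-keys-by-length-and-scan) by one fused fold over ENTITY_MAPPING that simultaneously tracks the first subject match and the longest text match (strict > so first-seen wins length ties), with no sort and no early return.
import Mathlib
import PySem

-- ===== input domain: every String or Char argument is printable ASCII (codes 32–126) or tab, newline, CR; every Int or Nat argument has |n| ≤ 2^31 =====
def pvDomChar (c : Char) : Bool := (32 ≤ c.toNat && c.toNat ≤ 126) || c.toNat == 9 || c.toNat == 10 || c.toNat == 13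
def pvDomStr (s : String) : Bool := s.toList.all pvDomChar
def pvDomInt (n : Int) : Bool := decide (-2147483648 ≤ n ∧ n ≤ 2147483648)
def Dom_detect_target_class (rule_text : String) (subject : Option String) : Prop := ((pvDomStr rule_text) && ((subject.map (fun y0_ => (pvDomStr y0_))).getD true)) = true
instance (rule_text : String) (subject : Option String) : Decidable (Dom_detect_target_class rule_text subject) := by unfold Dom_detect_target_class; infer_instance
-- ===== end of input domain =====

-- B fuses A's two staged early-return loops (subject scan, then sort keys by length and scan)
-- into ONE fold over ENTITY_MAPPING tracking the first subject match and the longest text match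
-- (strict >, first-seen wins length ties) — alternative decomposition, same results.

-- Shared module constant: the ENTITY_MAPPING dict literal (insertion order).
def ENTITY_MAPPING : PySem.Dict String String := PySem.Dict.mk
  [("student", "Student"), ("postgraduate", "PostgraduateStudent"), ("pg student", "PostgraduateStudent"),
   ("master", "PostgraduateStudent"), ("doctoral", "PostgraduateStudent"), ("diploma", "PostgraduateStudent"),
   ("exchange", "ExchangeStudent"), ("graduating", "Student"), ("employee", "Employee"), ("staff", "Staff"),
   ("faculty", "Faculty"), ("instructor", "Faculty"), ("invigilator", "Faculty"), ("fee", "Fee"),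
   ("tuition", "TuitionFee"), ("registration", "RegistrationFee"), ("account", "Account"),
   ("overdue", "OverdueAccount"), ("invoice", "Invoice"), ("sponsor", "Sponsor"), ("payment", "Fee"),
   ("accommodation", "Accommodation"), ("dormitory", "Dormitory"), ("housing", "Accommodation"),
   ("resident", "Accommodation"), ("room", "Accommodation"), ("course", "Course"), ("research", "Research"),
   ("contracted research", "ContractedResearch"), ("publication", "ResearchPublication"),
   ("examination", "Examination"), ("exam", "Examination"), ("semester", "Semester"),
   ("grievance", "Grievance"), ("appeal", "Appeal"), ("committee", "Committee"),
   ("grievance committee", "GrievanceCommittee"), ("person", "Person")]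

-- ===== PORT A =====
-- 'for keyword, entity_class in ENTITY_MAPPING.items(): if keyword in subject_lower: return entity_class'
def pvSubjScanA : List (String × String) → String → Option String
  | [], _ => none
  | (kw, cls) :: rest, s => if PySem.Str.isIn kw s then some cls else pvSubjScanA rest s

-- 'for keyword in priority_keywords: if keyword in text_lower: return ENTITY_MAPPING[keyword]'
def pvTextScanA : List String → String → Option String
  | [], _ => none
  | kw :: rest, t => if PySem.Str.isIn kw t then some kw else pvTextScanA rest t

def detect_target_class (rule_text : String) (subject : Option String) : String :=
  let text_lower := PySem.Str.lower rule_text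
  let subjRes : Option String :=
    match subject with
    | some s => if s ≠ "" then pvSubjScanA ENTITY_MAPPING.items (PySem.Str.lower s) else none  -- 'if subject:' (None and "" falsy)
    | none => none
  match subjRes with
  | some c => c
  | none =>
    let priority_keywords := PySem.List.sorted ENTITY_MAPPING.keys (fun k => PySem.Str.len k) true
    match pvTextScanA priority_keywords text_lower with
    | some kw => (PySem.Dict.get? ENTITY_MAPPING kw).getD "Person"  -- kw comes from keys, so always present
    | none => "Person"

-- ===== PORT B =====
-- one fused loop body: state = (subj_cls, (best_len, best_cls))
def pvFuseStep (subject_lower : Option String) (text_lower : String)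
    (acc : Option String × Int × String) (p : String × String) : Option String × Int × String :=
  ( (match acc.1, subject_lower with
     | none, some sl => if PySem.Str.isIn p.1 sl then some p.2 else none
     | a, _ => a),
    (if decide (acc.2.1 < PySem.Str.len p.1) && PySem.Str.isIn p.1 text_lower
     then (PySem.Str.len p.1, p.2) else acc.2) )

def detect_target_class_alt (rule_text : String) (subject : Option String) : String :=
  let text_lower := PySem.Str.lower rule_text
  let subject_lower : Option String :=
    match subject with
    | some s => if s ≠ "" then some (PySem.Str.lower s) else none  -- 'subject.lower() if subject else None'
    | none => none
  let r := ENTITY_MAPPING.items.foldl (pvFuseStep subject_lower text_lower)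
    ((none : Option String), ((0 : Int), "Person"))
  match r.1 with
  | some c => c
  | none => r.2.2

-- ===== PRECONDITION & SPEC =====
def Spec_detect_target_class (rule_text : String) (subject : Option String) (out : String) : Prop := out = detect_target_class_alt rule_text subject
instance (rule_text : String) (subject : Option String) (out : String) : Decidable (Spec_detect_target_class rule_text subject out) := by unfold Spec_detect_target_class; infer_instance

-- ===== CLAIM (what is proved, stated in full; the proofs are below) =====
def Claim_equal_detect_target_class : Prop := ∀ (rule_text : String) (subject : Option String), Dom_detect_target_class rule_text subject → Spec_detect_target_class rule_text subject (detect_target_class rule_text subject)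

-- ===== LEMMAS AND PROOFS =====

-- items indexed by their insertion position (proof device)
def pvLI : List (Nat × String × String) :=
  [(0, "student", "Student"), (1, "postgraduate", "PostgraduateStudent"), (2, "pg student", "PostgraduateStudent"), (3, "master", "PostgraduateStudent"), (4, "doctoral", "PostgraduateStudent"), (5, "diploma", "PostgraduateStudent"), (6, "exchange", "ExchangeStudent"), (7, "graduating", "Student"), (8, "employee", "Employee"), (9, "staff", "Staff"), (10, "faculty", "Faculty"), (11, "instructor", "Faculty"), (12, "invigilator", "Faculty"), (13, "fee", "Fee"), (14, "tuition", "TuitionFee"), (15, "registration", "RegistrationFee"), (16, "account", "Account"), (17, "overdue", "OverdueAccount"), (18, "invoice", "Invoice"), (19, "sponsor", "Sponsor"), (20, "payment", "Fee"), (21, "accommodation", "Accommodation"), (22, "dormitory", "Dormitory"), (23, "housing", "Accommodation"), (24, "resident", "Accommodation"), (25, "room", "Accommodation"), (26, "course", "Course"), (27, "research", "Research"), (28, "contracted research", "ContractedResearch"), (29, "publication", "ResearchPublication"), (30, "examination", "Examination"), (31, "exam", "Examination"), (32, "semester", "Semester"), (33, "grievance", "Grievance"), (34, "appeal", "Appeal"),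 (35, "committee", "Committee"), (36, "grievance committee", "GrievanceCommittee"), (37, "person", "Person")]

-- the same triples in A's priority order: length descending, insertion index ascending on ties
def pvSI : List (Nat × String × String) :=
  [(28, "contracted research", "ContractedResearch"), (36, "grievance committee", "GrievanceCommittee"), (21, "accommodation", "Accommodation"), (1, "postgraduate", "PostgraduateStudent"), (15, "registration", "RegistrationFee"), (12, "invigilator", "Faculty"), (29, "publication", "ResearchPublication"), (30, "examination", "Examination"), (2, "pg student", "PostgraduateStudent"), (7, "graduating", "Student"), (11, "instructor", "Faculty"), (22, "dormitory", "Dormitory"), (33, "grievance", "Grievance"), (35, "committee", "Committee"), (4, "doctoral", "PostgraduateStudent"), (6, "exchange", "ExchangeStudent"), (8, "employee", "Employee"), (24, "resident", "Accommodation"), (27, "research", "Research"), (32, "semester", "Semester"), (0, "student", "Student"), (5, "diploma", "PostgraduateStudent"), (10, "faculty", "Faculty"), (14, "tuition", "TuitionFee"), (16, "account", "Account"), (17, "overdue", "OverdueAccount"), (18, "invoice", "Invoice"), (19, "sponsor", "Sponsor"), (20, "payment", "Fee"), (23, "housing", "Accommodation"), (3, "master", "PostgraduateStudent"), (26, "course",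 "Course"), (34, "appeal", "Appeal"), (37, "person", "Person"), (9, "staff", "Staff"), (25, "room", "Accommodation"), (31, "exam", "Examination"), (13, "fee", "Fee")]

-- strict priority order: longer keyword first, insertion index breaks length ties
def pvPrec (a b : Nat × String × String) : Bool :=
  decide (PySem.Str.len b.2.1 < PySem.Str.len a.2.1) ||
  (decide (PySem.Str.len a.2.1 = PySem.Str.len b.2.1) && decide (a.1 < b.1))

def pvScanI (t : String) : List (Nat × String × String) → Option (Nat × String × String)
  | [] => none
  | p :: rest => if PySem.Str.isIn p.2.1 t then some p else pvScanI t rest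

-- length-only step on indexed triples (B's best-tracking step, index carried along)
def pvStepI (t : String) (acc : Option (Nat × String × String)) (p : Nat × String × String) : Option (Nat × String × String) :=
  if PySem.Str.isIn p.2.1 t && (match acc with | none => true | some b => decide (PySem.Str.len b.2.1 < PySem.Str.len p.2.1))
  then some p else acc

-- fold step comparing by the full priority order
def pvStepP (t : String) (acc : Option (Nat × String × String)) (p : Nat × String × String) : Option (Nat × String × String) :=
  if PySem.Str.isIn p.2.1 t && (match acc with | none => true | some b => pvPrec p b)
  then some p else acc

-- abstraction from the indexed optional best to B's (best_len, best_cls) pair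
def pvG : Option (Nat × String × String) → Int × String
  | none => (0, "Person")
  | some p => (PySem.Str.len p.2.1, p.2.2)

theorem pvPrec_asymm (a b : Nat × String × String) (h : pvPrec a b = true) : pvPrec b a = false := by
  simp only [pvPrec, Bool.or_eq_true, Bool.and_eq_true, decide_eq_true_eq] at *
  simp only [Bool.or_eq_false_iff, Bool.and_eq_false_iff, decide_eq_false_iff_not]
  omega

theorem pvPrec_trans (a b c : Nat × String × String) (hab : pvPrec a b = true) (hbc : pvPrec b c = true) :
    pvPrec a c = true := by
  simp only [pvPrec, Bool.or_eq_true, Bool.and_eq_true, decide_eq_true_eq] at *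
  omega

-- the subject component of B's fused step, in isolation
def pvSubjStep (sl : Option String) (acc : Option String) (p : String × String) : Option String :=
  match acc, sl with
  | none, some s => if PySem.Str.isIn p.1 s then some p.2 else none
  | a, _ => a

-- B's fused fold over a pair state splits into the two component folds
theorem pvFuse_split (sl : Option String) (t : String) (L : List (String × String))
    (a : Option String) (b : Int × String) :
    L.foldl (pvFuseStep sl t) (a, b)
      = (L.foldl (pvSubjStep sl) a,
         L.foldl (fun b p => if decide (b.1 < PySem.Str.len p.1) && PySem.Str.isIn p.1 t
                             then (PySem.Str.len p.1, p.2) else b) b) := by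
  induction L generalizing a b with
  | nil => rfl
  | cons p rest ih => exact ih _ _

theorem pvSubjFold_some (sl : Option String) (L : List (String × String)) (c : String) :
    L.foldl (pvSubjStep sl) (some c) = some c := by
  induction L with
  | nil => rfl
  | cons p rest ih => simpa [pvSubjStep] using ih

-- B's keep-first fold equals A's early-return subject scan
theorem pvSubjFold_eq_scan (s : String) (L : List (String × String)) :
    L.foldl (pvSubjStep (some s)) none = pvSubjScanA L s := by
  induction L with
  | nil => rfl
  | cons p rest ih =>
    cases p with
    | mk kw cls =>
      by_cases h : PySem.Chars.isIn kw.toList s.toList = true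
      · simp [pvSubjStep, pvSubjScanA, h, pvSubjFold_some]
      · simp only [Bool.not_eq_true] at h
        simp [pvSubjStep, pvSubjScanA, h, ih]

theorem pvSubjFold_none (L : List (String × String)) :
    L.foldl (pvSubjStep none) none = none := by
  induction L with
  | nil => rfl
  | cons p rest ih => simpa [pvSubjStep] using ih

-- B's best-tracking component over the plain items is the indexed length-only fold under pvG
theorem pvFold_g (t : String) (L : List (Nat × String × String)) (acc : Option (Nat × String × String))
    (hlen : ∀ p ∈ L, 0 < PySem.Str.len p.2.1) :
    (L.map (fun p => (p.2.1, p.2.2))).foldl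
        (fun b p => if decide (b.1 < PySem.Str.len p.1) && PySem.Str.isIn p.1 t
                    then (PySem.Str.len p.1, p.2) else b) (pvG acc)
      = pvG (L.foldl (pvStepI t) acc) := by
  induction L generalizing acc with
  | nil => rfl
  | cons p rest ih =>
    have hp := hlen p (List.mem_cons_self ..)
    have hstep : (if decide ((pvG acc).1 < PySem.Str.len p.2.1) && PySem.Str.isIn p.2.1 t
                  then (PySem.Str.len p.2.1, p.2.2) else pvG acc) = pvG (pvStepI t acc p) := by
      cases acc with
      | none =>
        by_cases hm : PySem.Chars.isIn p.2.1.toList t.toList = true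
        · simp [pvG, pvStepI, hm]
          intro h
          rw [h] at hp
          simp at hp
        · simp only [Bool.not_eq_true] at hm
          simp [pvG, pvStepI, hm]
      | some b => simp [pvG, pvStepI, Bool.and_comm]; split <;> simp
    simp only [List.map_cons, List.foldl_cons]
    rw [hstep]
    exact ih (pvStepI t acc p) (fun q hq => hlen q (List.mem_cons_of_mem _ hq))

-- case shapes of the priority step
theorem pvStepP_not (t : String) (a z : _) (h : PySem.Chars.isIn a.2.1.toList t.toList = false) : pvStepP t z a = z := by
  cases z <;> simp [pvStepP, h]

theorem pvStepP_none (t : String) (a : _) (h : PySem.Chars.isIn a.2.1.toList t.toList = true) : pvStepP t none a = some a := by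
  simp [pvStepP, h]

theorem pvStepP_pos (t : String) (a c : _) (h : PySem.Chars.isIn a.2.1.toList t.toList = true) (hp : pvPrec a c = true) :
    pvStepP t (some c) a = some a := by
  simp [pvStepP, h, hp]

theorem pvStepP_neg (t : String) (a c : _) (hp : pvPrec a c = false) :
    pvStepP t (some c) a = some c := by
  simp [pvStepP, hp]

-- on an index-ascending list the length-only step agrees with the full-priority step
theorem pvFold_stepI_eq_stepP (t : String) (L : List (Nat × String × String)) (acc : Option (Nat × String × String))
    (hL : L.Pairwise (fun a b => a.1 < b.1))
    (hacc : ∀ q ∈ L, ∀ b, acc = some b → b.1 < q.1) :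
    L.foldl (pvStepI t) acc = L.foldl (pvStepP t) acc := by
  induction L generalizing acc with
  | nil => rfl
  | cons p rest ih =>
    have hpair := (List.pairwise_cons.mp hL)
    have hstep : pvStepI t acc p = pvStepP t acc p := by
      cases acc with
      | none => rfl
      | some b =>
        have hb : b.1 < p.1 := hacc p (List.mem_cons_self ..) b rfl
        have : pvPrec p b = decide (PySem.Str.len b.2.1 < PySem.Str.len p.2.1) := by
          simp only [pvPrec]
          by_cases h : PySem.Str.len b.2.1 < PySem.Str.len p.2.1 <;> simp <;> omega
        simp [pvStepI, pvStepP, this]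
    rw [List.foldl_cons, List.foldl_cons, hstep]
    refine ih (pvStepP t acc p) hpair.2 ?_
    intro q hq b hb
    have hpq : p.1 < q.1 := hpair.1 q hq
    by_cases hm : PySem.Chars.isIn p.2.1.toList t.toList = true
    · cases acc with
      | none =>
        rw [pvStepP_none t p hm] at hb
        cases hb; omega
      | some c =>
        by_cases hp : pvPrec p c = true
        · rw [pvStepP_pos t p c hm hp] at hb
          cases hb; omega
        · rw [pvStepP_neg t p c (by simpa using hp)] at hb
          exact hacc q (List.mem_cons_of_mem _ hq) b hb
    · rw [pvStepP_not t p acc (by simpa using hm)] at hb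
      exact hacc q (List.mem_cons_of_mem _ hq) b hb

-- the priority-step fold commutes for elements that are comparable under pvPrec
theorem pvStepP_comm (t : String) (a b : Nat × String × String)
    (htri : pvPrec a b = true ∨ pvPrec b a = true ∨ a = b) (z : Option (Nat × String × String)) :
    pvStepP t (pvStepP t z a) b = pvStepP t (pvStepP t z b) a := by
  by_cases ma : PySem.Chars.isIn a.2.1.toList t.toList = true
  case neg =>
    rw [pvStepP_not t a z (by simpa using ma), pvStepP_not t a (pvStepP t z b) (by simpa using ma)]
  case pos =>
  by_cases mb : PySem.Chars.isIn b.2.1.toList t.toList = true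
  case neg =>
    rw [pvStepP_not t b (pvStepP t z a) (by simpa using mb), pvStepP_not t b z (by simpa using mb)]
  case pos =>
  cases z with
  | none =>
    rw [pvStepP_none t a ma, pvStepP_none t b mb]
    by_cases hba : pvPrec b a = true
    · rw [pvStepP_pos t b a mb hba, pvStepP_neg t a b (pvPrec_asymm b a hba)]
    · rcases htri with hab | h | h
      · rw [pvStepP_neg t b a (by simpa using hba), pvStepP_pos t a b ma hab]
      · exact absurd h hba
      · subst h; rfl
  | some c =>
    by_cases hac : pvPrec a c = true <;> by_cases hbc : pvPrec b c = true
    · rw [pvStepP_pos t a c ma hac, pvStepP_pos t b c mb hbc]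
      by_cases hba : pvPrec b a = true
      · rw [pvStepP_pos t b a mb hba, pvStepP_neg t a b (pvPrec_asymm b a hba)]
      · rcases htri with hab | h | h
        · rw [pvStepP_neg t b a (by simpa using hba), pvStepP_pos t a b ma hab]
        · exact absurd h hba
        · subst h; rfl
    · have hba : pvPrec b a = false := by
        by_contra h
        exact hbc (pvPrec_trans b a c (by simpa using h) hac)
      rw [pvStepP_pos t a c ma hac, pvStepP_neg t b c (by simpa using hbc),
          pvStepP_neg t b a hba, pvStepP_pos t a c ma hac]
    · have hab : pvPrec a b = false := by
        by_contra h
        exact hac (pvPrec_trans a b c (by simpa using h) hbc)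
      rw [pvStepP_neg t a c (by simpa using hac), pvStepP_pos t b c mb hbc,
          pvStepP_neg t a b hab]
    · rw [pvStepP_neg t a c (by simpa using hac), pvStepP_neg t b c (by simpa using hbc),
          pvStepP_neg t a c (by simpa using hac)]

-- once the priority-maximal matching element is in the accumulator it survives the rest of the fold
theorem pvFold_stepP_stay (t : String) (S : List (Nat × String × String)) (p : Nat × String × String)
    (h : ∀ q ∈ S, pvPrec q p = false) : S.foldl (pvStepP t) (some p) = some p := by
  induction S with
  | nil => rfl
  | cons q rest ih =>
    have hq := h q (List.mem_cons_self ..)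
    have : pvStepP t (some p) q = some p := by simp [pvStepP, hq]
    rw [List.foldl_cons, this]
    exact ih (fun r hr => h r (List.mem_cons_of_mem _ hr))

-- on a pvPrec-sorted list the fold is the first match
theorem pvFold_stepP_sorted (t : String) (S : List (Nat × String × String))
    (hS : S.Pairwise (fun a b => pvPrec a b = true)) :
    S.foldl (pvStepP t) none = pvScanI t S := by
  induction S with
  | nil => rfl
  | cons p rest ih =>
    have hpair := List.pairwise_cons.mp hS
    by_cases hm : PySem.Chars.isIn p.2.1.toList t.toList = true
    · have : pvStepP t none p = some p := by simp [pvStepP, hm]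
      rw [List.foldl_cons, this, pvFold_stepP_stay t rest p (fun q hq => pvPrec_asymm p q (hpair.1 q hq))]
      simp [pvScanI, hm]
    · have : pvStepP t none p = none := by simp [pvStepP, hm]
      rw [List.foldl_cons, this, ih hpair.2]
      simp [pvScanI, hm]

-- A's scan over the projected keywords is the indexed scan with the index forgotten
theorem pvScanA_map (t : String) (S : List (Nat × String × String)) :
    pvTextScanA (S.map (fun p => p.2.1)) t = (pvScanI t S).map (fun p => p.2.1) := by
  induction S with
  | nil => rfl
  | cons p rest ih => by_cases h : PySem.Chars.isIn p.2.1.toList t.toList = true <;> simp [pvTextScanA, pvScanI, h, ih]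

theorem pvScanI_mem (t : String) (S : List (Nat × String × String)) (p : Nat × String × String)
    (h : pvScanI t S = some p) : p ∈ S := by
  induction S with
  | nil => simp [pvScanI] at h
  | cons q rest ih =>
    simp only [pvScanI] at h
    split at h
    · cases h; exact List.mem_cons_self ..
    · exact List.mem_cons_of_mem _ (ih h)

-- A's sort-then-scan text phase equals B's best-tracking fold component
theorem pvText_eq (t : String) :
    (match pvTextScanA (PySem.List.sorted ENTITY_MAPPING.keys (fun k => PySem.Str.len k) true) t with
     | some kw => (PySem.Dict.get? ENTITY_MAPPING kw).getD "Person"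
     | none => "Person")
    = (ENTITY_MAPPING.items.foldl
        (fun b p => if decide (b.1 < PySem.Str.len p.1) && PySem.Str.isIn p.1 t
                    then (PySem.Str.len p.1, p.2) else b) ((0 : Int), "Person")).2 := by
  have hsorted : PySem.List.sorted ENTITY_MAPPING.keys (fun k => PySem.Str.len k) true
      = pvSI.map (fun p => p.2.1) := by decide
  have hitems : ENTITY_MAPPING.items = pvLI.map (fun p => (p.2.1, p.2.2)) := by decide
  have hperm : pvLI.Perm pvSI := by decide
  have htri : ∀ a ∈ pvLI, ∀ b ∈ pvLI, pvPrec a b = true ∨ pvPrec b a = true ∨ a = b := by decide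
  have hidx : pvLI.Pairwise (fun a b => a.1 < b.1) := by decide
  have hlen : ∀ p ∈ pvLI, 0 < PySem.Str.len p.2.1 := by decide
  have hpairS : pvSI.Pairwise (fun a b => pvPrec a b = true) := by decide
  have hlook : ∀ p ∈ pvSI, (PySem.Dict.get? ENTITY_MAPPING p.2.1).getD "Person" = p.2.2 := by decide
  have hB : ENTITY_MAPPING.items.foldl
        (fun b p => if decide (b.1 < PySem.Str.len p.1) && PySem.Str.isIn p.1 t
                    then (PySem.Str.len p.1, p.2) else b) ((0 : Int), "Person")
      = pvG (pvSI.foldl (pvStepP t) none) := by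
    rw [hitems]
    have h1 := pvFold_g t pvLI none hlen
    rw [show pvG none = ((0 : Int), "Person") from rfl] at h1
    rw [h1, pvFold_stepI_eq_stepP t pvLI none hidx (by intro q _ b hb; cases hb)]
    rw [hperm.foldl_eq' (fun a ha b hb z => pvStepP_comm t a b (htri a ha b hb) z)]
  rw [hsorted, pvScanA_map, hB, pvFold_stepP_sorted t pvSI hpairS]
  cases hscan : pvScanI t pvSI with
  | none => simp [pvG]
  | some p => simpa [pvG] using hlook p (pvScanI_mem t pvSI p hscan)

-- ===== VERDICT (by name: the statement is the Claim_ definition above) =====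
theorem detect_target_class_spec : Claim_equal_detect_target_class := by
  intro rule_text subject _
  unfold Spec_detect_target_class detect_target_class detect_target_class_alt
  cases subject with
  | none =>
    simp only [pvFuse_split, pvSubjFold_none]
    exact pvText_eq _
  | some s =>
    by_cases hs : s ≠ ""
    · simp only [pvFuse_split, if_pos hs, pvSubjFold_eq_scan]
      cases h : pvSubjScanA ENTITY_MAPPING.items (PySem.Str.lower s) with
      | some c => rfl
      | none => simpa using pvText_eq (PySem.Str.lower rule_text)
    · simp only [pvFuse_split, if_neg hs, pvSubjFold_none]
      exact pvText_eq _
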